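-- pv_equiv track=rewrite | github.com/iamrishap/PythonBits | InterviewBits/graphs/smallest-seq-with-primes.py | solve
-- ===== SOURCE A (Python) =====
-- def solve(A, B, C, D):
--     """
--     Failed to give the right answer. It doesn't know how many combinations to use to get to the answer.
--     If there is a very small prime number, it is better to reuse it repeatedly instead of choosing other primes.
--     """
--     seq = set()
--     i = 1
--     from itertools import combinations_with_replacement
--     from functools import reduce
--     import operator
--     reduce(operator.mul, (3, 4, 5), 1)
--     while i < 9:  # len(seq) < D and
--         seq.update([reduce(operator.mul, comb, 1) for comb in combinations_with_replacement([A, B, C], i)])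
--         i += 1
--     return sorted(list(seq))[: D]
-- ===== SOURCE B (Python) =====
-- def solve(A, B, C, D):
--     seq = set()
--     for x in range(9):
--         for y in range(9 - x):
--             for z in range(9 - x - y):
--                 if x + y + z >= 1:
--                     seq.add(A**x * B**y * C**z)
--     return sorted(seq)[:D]
-- ===== Notes on version B (the rewrite author's own statement) =====
-- stated objective: alternative
-- what changed: Replaced the itertools combinations_with_replacement enumeration (all multisets of sizes 1..8 over [A,B,C], each reduced by multiplication) with three nested loops over exponent counts x+y+z in 1..8 adding A**x*B**y*C**z to the set directly.
import Mathlib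
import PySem

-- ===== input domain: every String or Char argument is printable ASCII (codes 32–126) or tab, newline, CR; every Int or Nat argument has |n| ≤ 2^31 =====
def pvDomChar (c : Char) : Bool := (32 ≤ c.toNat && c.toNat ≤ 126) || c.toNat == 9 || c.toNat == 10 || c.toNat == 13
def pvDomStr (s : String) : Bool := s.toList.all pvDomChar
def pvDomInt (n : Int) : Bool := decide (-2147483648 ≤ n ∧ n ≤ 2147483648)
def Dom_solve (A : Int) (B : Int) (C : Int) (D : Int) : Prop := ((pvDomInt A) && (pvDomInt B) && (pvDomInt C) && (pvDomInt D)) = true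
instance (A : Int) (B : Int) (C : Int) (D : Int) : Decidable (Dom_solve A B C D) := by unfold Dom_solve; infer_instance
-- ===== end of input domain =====

-- B replaces the combinations_with_replacement enumeration by three nested loops over
-- exponent counts (x, y, z) with x+y+z in 1..8; objective: alternative decomposition.

-- ===== PORT A =====
-- itertools.combinations_with_replacement(l, n), ported by hand (no PySem primitive):
-- multisets of size n drawn from l in nondecreasing position order.
def pvCwr : List Int → Nat → List (List Int)
  | _, 0 => [[]]
  | [], _+1 => []
  | a :: t, n+1 => ((pvCwr (a :: t) n).map (fun c => a :: c)) ++ pvCwr t (n+1)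
termination_by l n => (n, l.length)

-- reduce(operator.mul, comb, 1)
def pvProd (l : List Int) : Int := l.foldl (· * ·) 1

def solve (A : Int) (B : Int) (C : Int) (D : Int) : List Int :=
  -- while i < 9: seq.update([...]); i += 1   (the reduce(…,(3,4,5),1) line is dead code)
  let seq : PySem.Set Int :=
    (PySem.List.pyRange 1 9 1).foldl
      (fun s i => PySem.Set.update s ((pvCwr [A, B, C] i.toNat).map pvProd))
      PySem.Set.empty
  PySem.List.slice (PySem.List.sorted seq (fun x => x) false) none (some D)

-- ===== PORT B =====
-- A**x with x ≥ 0
def pvPow (a : Int) (n : Int) : Int := a ^ n.toNat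

def solve_alt (A : Int) (B : Int) (C : Int) (D : Int) : List Int :=
  let seq : PySem.Set Int :=
    (PySem.List.pyRange 0 9 1).foldl (fun s x =>
      (PySem.List.pyRange 0 (9 - x) 1).foldl (fun s y =>
        (PySem.List.pyRange 0 (9 - x - y) 1).foldl (fun s z =>
          if x + y + z ≥ 1 then PySem.Set.add s (pvPow A x * pvPow B y * pvPow C z) else s)
          s) s)
      PySem.Set.empty
  PySem.List.slice (PySem.List.sorted seq (fun x => x) false) none (some D)

-- ===== PRECONDITION & SPEC =====
def Spec_solve (A : Int) (B : Int) (C : Int) (D : Int) (out : List Int) : Prop := out = solve_alt A B C D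
instance (A : Int) (B : Int) (C : Int) (D : Int) (out : List Int) : Decidable (Spec_solve A B C D out) := by unfold Spec_solve; infer_instance

-- ===== CLAIM (what is proved, stated in full; the proofs are below) =====
def Claim_equal_solve : Prop := ∀ (A : Int) (B : Int) (C : Int) (D : Int), Dom_solve A B C D → Spec_solve A B C D (solve A B C D)

-- ===== LEMMAS AND PROOFS =====

lemma pvFoldlMul (l : List Int) : ∀ x : Int, l.foldl (· * ·) x = x * pvProd l := by
  induction l with
  | nil => intro x; simp [pvProd]
  | cons a t ih =>
    intro x
    have h : pvProd (a :: t) = (1 * a) * pvProd t := by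
      unfold pvProd
      simp only [List.foldl_cons]
      exact ih (1 * a)
    simp only [List.foldl_cons]
    rw [ih (x * a), h]
    ring

lemma pvProd_cons (a : Int) (l : List Int) : pvProd (a :: l) = a * pvProd l := by
  unfold pvProd
  simp only [List.foldl_cons]
  rw [pvFoldlMul l (1 * a), pvFoldlMul l 1]
  ring

lemma pvCwr_zero (l : List Int) : pvCwr l 0 = [[]] := by
  unfold pvCwr; rfl

lemma pvCwr_nil (n : Nat) : pvCwr [] (n + 1) = [] := by
  unfold pvCwr; rfl

lemma pvCwr_cons (a : Int) (t : List Int) (n : Nat) :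
    pvCwr (a :: t) (n + 1) = (pvCwr (a :: t) n).map (fun c => a :: c) ++ pvCwr t (n + 1) := by
  rw [pvCwr]

lemma map_prod_cons (xs : List (List Int)) (a : Int) :
    (xs.map (fun l => a :: l)).map pvProd = (xs.map pvProd).map (fun v => a * v) := by
  simp [List.map_map, Function.comp, pvProd_cons]

lemma pvCwr_one (c : Int) (n : Nat) : (pvCwr [c] n).map pvProd = [c ^ n] := by
  induction n with
  | zero => rw [pvCwr_zero]; simp [pvProd]
  | succ n ih =>
    rw [pvCwr_cons, pvCwr_nil, List.append_nil, map_prod_cons, ih]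
    simp [pow_succ, mul_comm]

lemma mem_pvCwr_two (b c v : Int) (n : Nat) :
    v ∈ (pvCwr [b, c] n).map pvProd ↔ ∃ y z : Nat, y + z = n ∧ v = b ^ y * c ^ z := by
  induction n generalizing v with
  | zero =>
    rw [pvCwr_zero]
    simp only [List.map_cons, List.map_nil, List.mem_singleton]
    constructor
    · rintro rfl; exact ⟨0, 0, by omega, by simp [pvProd]⟩
    · rintro ⟨y, z, hyz, rfl⟩
      have hy : y = 0 := by omega
      have hz : z = 0 := by omega
      simp [hy, hz, pvProd]
  | succ n ih =>
    rw [pvCwr_cons, List.map_append, map_prod_cons, pvCwr_one]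
    constructor
    · intro h
      rcases List.mem_append.mp h with h | h
      · obtain ⟨w, hw, rfl⟩ := List.mem_map.mp h
        obtain ⟨y, z, hyz, rfl⟩ := (ih w).mp hw
        exact ⟨y + 1, z, by omega, by rw [pow_succ]; ring⟩
      · rw [List.mem_singleton] at h
        exact ⟨0, n + 1, by omega, by rw [h, pow_zero, one_mul]⟩
    · rintro ⟨y, z, hyz, rfl⟩
      cases y with
      | zero =>
        refine List.mem_append.mpr (Or.inr ?_)
        rw [List.mem_singleton, pow_zero, one_mul]
        congr 1; omega
      | succ y =>
        refine List.mem_append.mpr (Or.inl ?_)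
        refine List.mem_map.mpr ⟨b ^ y * c ^ z, (ih _).mpr ⟨y, z, by omega, rfl⟩, ?_⟩
        rw [pow_succ]; ring

lemma mem_pvCwr_three (a b c v : Int) (n : Nat) :
    v ∈ (pvCwr [a, b, c] n).map pvProd ↔
      ∃ x y z : Nat, x + y + z = n ∧ v = a ^ x * b ^ y * c ^ z := by
  induction n generalizing v with
  | zero =>
    rw [pvCwr_zero]
    simp only [List.map_cons, List.map_nil, List.mem_singleton]
    constructor
    · rintro rfl; exact ⟨0, 0, 0, by omega, by simp [pvProd]⟩
    · rintro ⟨x, y, z, hs, rfl⟩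
      have hx : x = 0 := by omega
      have hy : y = 0 := by omega
      have hz : z = 0 := by omega
      simp [hx, hy, hz, pvProd]
  | succ n ih =>
    rw [pvCwr_cons, List.map_append, map_prod_cons]
    constructor
    · intro h
      rcases List.mem_append.mp h with h | h
      · obtain ⟨w, hw, rfl⟩ := List.mem_map.mp h
        obtain ⟨x, y, z, hs, rfl⟩ := (ih w).mp hw
        exact ⟨x + 1, y, z, by omega, by rw [pow_succ]; ring⟩
      · obtain ⟨y, z, hyz, rfl⟩ := (mem_pvCwr_two b c v (n + 1)).mp h
        exact ⟨0, y, z, by omega, by rw [pow_zero, one_mul]⟩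
    · rintro ⟨x, y, z, hs, rfl⟩
      cases x with
      | zero =>
        refine List.mem_append.mpr (Or.inr ?_)
        rw [pow_zero, one_mul]
        exact (mem_pvCwr_two b c _ (n + 1)).mpr ⟨y, z, by omega, rfl⟩
      | succ x =>
        refine List.mem_append.mpr (Or.inl ?_)
        refine List.mem_map.mpr ⟨a ^ x * b ^ y * c ^ z, (ih _).mpr ⟨x, y, z, by omega, rfl⟩, ?_⟩
        rw [pow_succ]; ring

lemma mem_foldl_set {β : Type} (f : PySem.Set Int → β → PySem.Set Int) (P : β → Int → Prop)
    (hf : ∀ s b y, y ∈ f s b ↔ y ∈ s ∨ P b y) :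
    ∀ (l : List β) (s0 : PySem.Set Int) (y : Int),
      y ∈ l.foldl f s0 ↔ y ∈ s0 ∨ ∃ b ∈ l, P b y := by
  intro l
  induction l with
  | nil => simp
  | cons b t ih =>
    intro s0 y
    rw [List.foldl_cons, ih, hf]
    simp only [List.mem_cons]
    constructor
    · rintro ((h | h) | ⟨b', hb', h⟩)
      · exact Or.inl h
      · exact Or.inr ⟨b, Or.inl rfl, h⟩
      · exact Or.inr ⟨b', Or.inr hb', h⟩
    · rintro (h | ⟨b', (rfl | hb'), h⟩)
      · exact Or.inl (Or.inl h)
      · exact Or.inl (Or.inr h)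
      · exact Or.inr ⟨b', hb', h⟩

lemma nodup_foldl_set {β : Type} (f : PySem.Set Int → β → PySem.Set Int)
    (hf : ∀ s b, s.Nodup → (f s b).Nodup) :
    ∀ (l : List β) (s0 : PySem.Set Int), s0.Nodup → (l.foldl f s0).Nodup := by
  intro l
  induction l with
  | nil => intro s0 h; simpa using h
  | cons b t ih => intro s0 h; exact ih _ (hf _ _ h)

-- the common characterisation of both accumulated sets
def pvM (A B C v : Int) : Prop :=
  ∃ x y z : Nat, 1 ≤ x + y + z ∧ x + y + z ≤ 8 ∧ v = A ^ x * B ^ y * C ^ z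

lemma mem_seqA (A B C v : Int) :
    v ∈ (PySem.List.pyRange 1 9 1).foldl
        (fun s i => PySem.Set.update s ((pvCwr [A, B, C] i.toNat).map pvProd))
        PySem.Set.empty ↔ pvM A B C v := by
  have hiff := mem_foldl_set
      (fun (s : PySem.Set Int) (i : Int) => PySem.Set.update s ((pvCwr [A, B, C] i.toNat).map pvProd))
      (fun i y => y ∈ (pvCwr [A, B, C] i.toNat).map pvProd)
      (fun s i y => PySem.Set.mem_update _ _ _)
      (PySem.List.pyRange 1 9 1) PySem.Set.empty v
  rw [hiff]
  simp only [PySem.Set.empty, List.not_mem_nil, false_or, PySem.List.mem_pyRange_one]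
  constructor
  · rintro ⟨i, ⟨hi1, hi9⟩, hv⟩
    obtain ⟨x, y, z, hs, hv⟩ := (mem_pvCwr_three A B C v i.toNat).mp hv
    exact ⟨x, y, z, by omega, by omega, hv⟩
  · rintro ⟨x, y, z, h1, h8, hv⟩
    refine ⟨((x + y + z : Nat) : Int), ⟨by exact_mod_cast h1, by exact_mod_cast (by omega : (x + y + z : Nat) < 9)⟩, ?_⟩
    rw [show ((x + y + z : Nat) : Int).toNat = x + y + z by omega, mem_pvCwr_three]
    exact ⟨x, y, z, rfl, hv⟩

lemma mem_seqB (A B C v : Int) :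
    v ∈ (PySem.List.pyRange 0 9 1).foldl (fun s x =>
        (PySem.List.pyRange 0 (9 - x) 1).foldl (fun s y =>
          (PySem.List.pyRange 0 (9 - x - y) 1).foldl (fun s z =>
            if x + y + z ≥ 1 then PySem.Set.add s (pvPow A x * pvPow B y * pvPow C z) else s)
            s) s)
        PySem.Set.empty ↔ pvM A B C v := by
  have hin : ∀ (x y : Int) (s : PySem.Set Int) (v : Int),
      v ∈ (PySem.List.pyRange 0 (9 - x - y) 1).foldl (fun s z =>
          if x + y + z ≥ 1 then PySem.Set.add s (pvPow A x * pvPow B y * pvPow C z) else s) s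
      ↔ v ∈ s ∨ ∃ z, (0 ≤ z ∧ z < 9 - x - y) ∧
          (x + y + z ≥ 1 ∧ v = pvPow A x * pvPow B y * pvPow C z) := by
    intro x y s v
    have hiff := mem_foldl_set
        (fun (s : PySem.Set Int) (z : Int) =>
          if x + y + z ≥ 1 then PySem.Set.add s (pvPow A x * pvPow B y * pvPow C z) else s)
        (fun z w => x + y + z ≥ 1 ∧ w = pvPow A x * pvPow B y * pvPow C z)
        (fun s z w => by
          by_cases h : x + y + z ≥ 1
          · simp only [if_pos h, PySem.Set.mem_add]; tauto
          · simp only [if_neg h]; tauto)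
        (PySem.List.pyRange 0 (9 - x - y) 1) s v
    rw [hiff]
    simp [PySem.List.mem_pyRange_one]
  have hmid : ∀ (x : Int) (s : PySem.Set Int) (v : Int),
      v ∈ (PySem.List.pyRange 0 (9 - x) 1).foldl (fun s y =>
          (PySem.List.pyRange 0 (9 - x - y) 1).foldl (fun s z =>
            if x + y + z ≥ 1 then PySem.Set.add s (pvPow A x * pvPow B y * pvPow C z) else s)
            s) s
      ↔ v ∈ s ∨ ∃ y, (0 ≤ y ∧ y < 9 - x) ∧ ∃ z, (0 ≤ z ∧ z < 9 - x - y) ∧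
          (x + y + z ≥ 1 ∧ v = pvPow A x * pvPow B y * pvPow C z) := by
    intro x s v
    have hiff := mem_foldl_set
        (fun (s : PySem.Set Int) (y : Int) =>
          (PySem.List.pyRange 0 (9 - x - y) 1).foldl (fun s z =>
            if x + y + z ≥ 1 then PySem.Set.add s (pvPow A x * pvPow B y * pvPow C z) else s) s)
        (fun y w => ∃ z, (0 ≤ z ∧ z < 9 - x - y) ∧
            (x + y + z ≥ 1 ∧ w = pvPow A x * pvPow B y * pvPow C z))
        (fun s y w => hin x y s w)
        (PySem.List.pyRange 0 (9 - x) 1) s v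
    rw [hiff]
    simp [PySem.List.mem_pyRange_one]
  have hiff := mem_foldl_set
      (fun (s : PySem.Set Int) (x : Int) =>
        (PySem.List.pyRange 0 (9 - x) 1).foldl (fun s y =>
          (PySem.List.pyRange 0 (9 - x - y) 1).foldl (fun s z =>
            if x + y + z ≥ 1 then PySem.Set.add s (pvPow A x * pvPow B y * pvPow C z) else s)
            s) s)
      (fun x w => ∃ y, (0 ≤ y ∧ y < 9 - x) ∧ ∃ z, (0 ≤ z ∧ z < 9 - x - y) ∧
          (x + y + z ≥ 1 ∧ w = pvPow A x * pvPow B y * pvPow C z))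
      (fun s x w => hmid x s w)
      (PySem.List.pyRange 0 9 1) PySem.Set.empty v
  rw [hiff]
  simp only [PySem.Set.empty, List.not_mem_nil, false_or, PySem.List.mem_pyRange_one]
  unfold pvM pvPow
  constructor
  · rintro ⟨x, ⟨hx0, hx9⟩, y, ⟨hy0, hy9⟩, z, ⟨hz0, hz9⟩, hge, rfl⟩
    exact ⟨x.toNat, y.toNat, z.toNat, by omega, by omega, rfl⟩
  · rintro ⟨x, y, z, h1, h8, rfl⟩
    refine ⟨(x : Int), ⟨by omega, by omega⟩, (y : Int), ⟨by omega, by omega⟩,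
      (z : Int), ⟨by omega, by omega⟩, by omega, ?_⟩
    simp

lemma nodup_seqA (A B C : Int) :
    ((PySem.List.pyRange 1 9 1).foldl
        (fun s i => PySem.Set.update s ((pvCwr [A, B, C] i.toNat).map pvProd))
        PySem.Set.empty).Nodup := by
  refine nodup_foldl_set
    (fun (s : PySem.Set Int) (i : Int) => PySem.Set.update s ((pvCwr [A, B, C] i.toNat).map pvProd))
    (fun s i h => PySem.Set.nodup_update _ _ h) _ _ ?_
  simp [PySem.Set.empty]

lemma nodup_seqB (A B C : Int) :
    ((PySem.List.pyRange 0 9 1).foldl (fun s x =>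
        (PySem.List.pyRange 0 (9 - x) 1).foldl (fun s y =>
          (PySem.List.pyRange 0 (9 - x - y) 1).foldl (fun s z =>
            if x + y + z ≥ 1 then PySem.Set.add s (pvPow A x * pvPow B y * pvPow C z) else s)
            s) s)
        PySem.Set.empty).Nodup := by
  refine nodup_foldl_set _ (fun s x h => ?_) _ _ (by simp [PySem.Set.empty])
  refine nodup_foldl_set _ (fun s y h => ?_) _ _ h
  refine nodup_foldl_set _ (fun s z h => ?_) _ _ h
  by_cases hc : x + y + z ≥ 1
  · simp only [if_pos hc]; exact PySem.Set.nodup_add _ _ h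
  · simp only [if_neg hc]; exact h

-- ===== VERDICT (by name: the statement is the Claim_ definition above) =====
theorem solve_spec : Claim_equal_solve := by
  intro A B C D _
  show solve A B C D = solve_alt A B C D
  unfold solve solve_alt
  exact congrArg (fun l => PySem.List.slice l none (some D))
    (PySem.List.sorted_eq_sorted_of_perm _ _ _ (fun a b h => h)
      ((List.perm_ext_iff_of_nodup (nodup_seqA A B C) (nodup_seqB A B C)).mpr
        (fun v => by rw [mem_seqA, mem_seqB])))
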